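-- pv_equiv track=rewrite | github.com/takajin0114/kyotei_Prediction | kyotei_predictor/tools/evaluation/analyze_hit_rate_detailed.py | action_to_trifecta
-- ===== SOURCE A (Python) =====
-- def action_to_trifecta(action: int) -> tuple:
--     """
--     アクション番号を3連単予想に変換
--
--     Args:
--         action: アクション番号 (0-119)
--
--     Returns:
--         3連単予想のタプル (1着, 2着, 3着)
--     """
--     # 6P3 = 120通りの組み合わせを生成
--     trifectas = []
--     for first in range(1, 7):
--         for second in range(1, 7):
--             for third in range(1, 7):
--                 if first != second and second != third and first != third:
--                     trifectas.append((first, second, third))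
--
--     if 0 <= action < len(trifectas):
--         return trifectas[action]
--     else:
--         # 無効なアクションの場合はデフォルト値を返す
--         return (1, 2, 3)
-- ===== SOURCE B (Python) =====
-- def action_to_trifecta(action: int) -> tuple:
--     if not (0 <= action < 120):
--         return (1, 2, 3)
--     remaining = [1, 2, 3, 4, 5, 6]
--     first = remaining.pop(action // 20)
--     second = remaining.pop((action % 20) // 4)
--     third = remaining.pop(action % 4)
--     return (first, second, third)
-- ===== Notes on version B (the rewrite author's own statement) =====
-- stated objective: simpler
-- what changed: B decodes the action index arithmetically (factorial-number-system style pops from a remaining list) instead of enumerating every trifecta permutation with triple nested loops.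
import Mathlib
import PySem

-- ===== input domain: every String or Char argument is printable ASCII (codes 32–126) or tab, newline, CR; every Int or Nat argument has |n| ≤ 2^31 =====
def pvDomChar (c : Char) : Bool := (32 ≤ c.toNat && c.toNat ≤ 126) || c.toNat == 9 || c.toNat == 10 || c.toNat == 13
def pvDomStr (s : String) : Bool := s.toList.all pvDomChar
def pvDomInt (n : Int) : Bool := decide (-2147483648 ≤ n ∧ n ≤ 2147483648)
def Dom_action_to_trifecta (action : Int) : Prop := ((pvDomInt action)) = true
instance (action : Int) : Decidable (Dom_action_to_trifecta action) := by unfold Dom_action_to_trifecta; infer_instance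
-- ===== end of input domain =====

-- B decodes the action index arithmetically (pops from a remaining list) instead of
-- enumerating all 120 permutations with triple nested loops; same value everywhere.

-- ===== PORT A =====
-- the 120-element list A builds with three nested loops (literal transliteration)
def trifectaList : List (Int × Int × Int) :=
  (PySem.List.pyRange 1 7 1).foldl (fun acc first =>
    (PySem.List.pyRange 1 7 1).foldl (fun acc second =>
      (PySem.List.pyRange 1 7 1).foldl (fun acc third =>
        if first ≠ second ∧ second ≠ third ∧ first ≠ third then
          acc ++ [(first, second, third)]
        else acc) acc) acc) []

def action_to_trifecta (action : Int) : Int × Int × Int :=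
  let trifectas := trifectaList
  if 0 ≤ action ∧ action < (trifectas.length : Int) then
    -- trifectas[action]; the guard makes the index in range, so `none` is unreachable
    match PySem.List.pyGet? trifectas action with
    | some t => t
    | none => (1, 2, 3)
  else
    (1, 2, 3)

-- ===== PORT B =====
def action_to_trifecta_alt (action : Int) : Int × Int × Int :=
  if ¬ (0 ≤ action ∧ action < 120) then (1, 2, 3)
  else
    -- remaining.pop(...) three times; the guard keeps every pop index in range,
    -- so the `none` fallbacks are unreachable
    match PySem.List.pop? ([1, 2, 3, 4, 5, 6] : List Int) (PySem.Int.floordiv action 20) with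
    | none => (1, 2, 3)
    | some (first, rem1) =>
      match PySem.List.pop? rem1 (PySem.Int.floordiv (PySem.Int.mod action 20) 4) with
      | none => (1, 2, 3)
      | some (second, rem2) =>
        match PySem.List.pop? rem2 (PySem.Int.mod action 4) with
        | none => (1, 2, 3)
        | some (third, _) => (first, second, third)

-- ===== PRECONDITION & SPEC =====
def Spec_action_to_trifecta (action : Int) (out : Int × Int × Int) : Prop := out = action_to_trifecta_alt action
instance (action : Int) (out : Int × Int × Int) : Decidable (Spec_action_to_trifecta action out) := by unfold Spec_action_to_trifecta; infer_instance

-- ===== CLAIM (what is proved, stated in full; the proofs are below) =====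
def Claim_equal_action_to_trifecta : Prop := ∀ (action : Int), Dom_action_to_trifecta action → Spec_action_to_trifecta action (action_to_trifecta action)

-- ===== LEMMAS AND PROOFS =====
set_option maxRecDepth 10000 in
theorem trifectaList_length : (trifectaList.length : Int) = 120 := by decide

-- ===== VERDICT (by name: the statement is the Claim_ definition above) =====
set_option maxRecDepth 10000 in
theorem action_to_trifecta_spec : Claim_equal_action_to_trifecta := by
  intro action _
  unfold Spec_action_to_trifecta
  by_cases h : 0 ≤ action ∧ action < 120
  · obtain ⟨h1, h2⟩ := h
    interval_cases action <;> decide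
  · simp only [action_to_trifecta, action_to_trifecta_alt, trifectaList_length]
    rw [if_neg h, if_pos h]
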